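-- pv_equiv track=rewrite | github.com/felipesantoos/smell-detector | smell_detector/keyword_duplication.py | duplicated_keywords_counter
-- ===== SOURCE A (Python) =====
-- def duplicated_keywords_counter(steps):
--     keyword_counts = {"Given": 0, "When": 0, "Then": 0}
--     for step in steps:
--         if step.startswith("Given"):
--             keyword_counts["Given"] += 1
--         elif step.startswith("When"):
--             keyword_counts["When"] += 1
--         elif step.startswith("Then"):
--             keyword_counts["Then"] += 1
--     return keyword_counts
-- ===== SOURCE B (Python) =====
-- def duplicated_keywords_counter(steps):
--     steps = list(steps)
--     return {kw: sum(1 for step in steps if step.startswith(kw))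
--             for kw in ("Given", "When", "Then")}
-- ===== Notes on version B (the rewrite author's own statement) =====
-- stated objective: simpler
-- what changed: Replaces the single branching if/elif loop mutating a counter dict with a per-keyword dict comprehension that counts each of the three prefixes by an independent scan (the prefixes are mutually exclusive, so counts match).
import Mathlib
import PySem

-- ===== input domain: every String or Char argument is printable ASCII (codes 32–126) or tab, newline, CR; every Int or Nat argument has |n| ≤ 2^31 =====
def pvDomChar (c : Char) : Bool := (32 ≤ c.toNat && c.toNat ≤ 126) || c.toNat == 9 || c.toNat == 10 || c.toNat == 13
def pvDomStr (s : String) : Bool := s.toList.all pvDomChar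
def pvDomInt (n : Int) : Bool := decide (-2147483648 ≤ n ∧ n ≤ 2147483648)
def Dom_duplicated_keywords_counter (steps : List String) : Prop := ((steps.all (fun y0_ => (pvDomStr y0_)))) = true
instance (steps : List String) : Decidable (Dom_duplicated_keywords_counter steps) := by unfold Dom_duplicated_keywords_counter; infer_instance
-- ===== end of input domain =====

-- B replaces A's single branching if/elif loop over a mutable counter dict with three
-- independent per-keyword scans assembled by a dict comprehension (objective: simpler).


-- ===== PORT A =====
def duplicated_keywords_counter (steps : List String) : List (String × Int) :=
  (steps.foldl (fun d step =>
      if PySem.Str.startswith step "Given" then d.modify "Given" 0 (· + 1)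
      else if PySem.Str.startswith step "When" then d.modify "When" 0 (· + 1)
      else if PySem.Str.startswith step "Then" then d.modify "Then" 0 (· + 1)
      else d)
    (((PySem.Dict.empty.insert "Given" (0 : Int)).insert "When" 0).insert "Then" 0)).items

-- ===== PORT B =====
def duplicated_keywords_counter_alt (steps : List String) : List (String × Int) :=
  ["Given", "When", "Then"].map (fun kw =>
    (kw, ((steps.filter (fun step => PySem.Str.startswith step kw)).map (fun _ => (1 : Int))).sum))

-- ===== PRECONDITION & SPEC =====
def Spec_duplicated_keywords_counter (steps : List String) (out : List (String × Int)) : Prop := out = duplicated_keywords_counter_alt steps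
instance (steps : List String) (out : List (String × Int)) : Decidable (Spec_duplicated_keywords_counter steps out) := by unfold Spec_duplicated_keywords_counter; infer_instance

-- ===== CLAIM (what is proved, stated in full; the proofs are below) =====
def Claim_equal_duplicated_keywords_counter : Prop := ∀ (steps : List String), Dom_duplicated_keywords_counter steps → Spec_duplicated_keywords_counter steps (duplicated_keywords_counter steps)

-- ===== LEMMAS AND PROOFS =====

-- two prefixes whose first characters differ cannot both be prefixes of s
lemma startswith_excl (s : String) (c1 c2 : Char) (p1 p2 : List Char) (hne : c1 ≠ c2)
    (h : PySem.Chars.startswith s.toList (c1 :: p1) = true) :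
    PySem.Chars.startswith s.toList (c2 :: p2) = false := by
  rw [PySem.Chars.startswith_iff] at h
  rw [Bool.eq_false_iff, Ne, PySem.Chars.startswith_iff]
  intro h2
  obtain ⟨u, hu⟩ := h
  obtain ⟨v, hv⟩ := h2
  rw [← hu] at hv
  simp at hv
  exact hne hv.1.symm

lemma sw_G_not_W (s : String) (h : PySem.Str.startswith s "Given" = true) :
    PySem.Str.startswith s "When" = false := by
  simp only [PySem.Str.startswith_eq] at *
  exact startswith_excl s 'G' 'W' ['i','v','e','n'] ['h','e','n'] (by decide) h

lemma sw_G_not_T (s : String) (h : PySem.Str.startswith s "Given" = true) :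
    PySem.Str.startswith s "Then" = false := by
  simp only [PySem.Str.startswith_eq] at *
  exact startswith_excl s 'G' 'T' ['i','v','e','n'] ['h','e','n'] (by decide) h

lemma sw_W_not_T (s : String) (h : PySem.Str.startswith s "When" = true) :
    PySem.Str.startswith s "Then" = false := by
  simp only [PySem.Str.startswith_eq] at *
  exact startswith_excl s 'W' 'T' ['h','e','n'] ['h','e','n'] (by decide) h

-- modify at each literal key reduces on the 3-key literal dict
lemma modG (g w t : Int) : (PySem.Dict.mk [("Given",g),("When",w),("Then",t)]).modify "Given" 0 (· + 1)
    = PySem.Dict.mk [("Given",g+1),("When",w),("Then",t)] := rfl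
lemma modW (g w t : Int) : (PySem.Dict.mk [("Given",g),("When",w),("Then",t)]).modify "When" 0 (· + 1)
    = PySem.Dict.mk [("Given",g),("When",w+1),("Then",t)] := rfl
lemma modT (g w t : Int) : (PySem.Dict.mk [("Given",g),("When",w),("Then",t)]).modify "Then" 0 (· + 1)
    = PySem.Dict.mk [("Given",g),("When",w),("Then",t+1)] := rfl

-- the loop invariant of A's fold: each slot accumulates its keyword's count
lemma loopA (steps : List String) (g w t : Int) :
    steps.foldl (fun d step =>
      if PySem.Str.startswith step "Given" then d.modify "Given" 0 (· + 1)
      else if PySem.Str.startswith step "When" then d.modify "When" 0 (· + 1)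
      else if PySem.Str.startswith step "Then" then d.modify "Then" 0 (· + 1)
      else d) (PySem.Dict.mk [("Given",g),("When",w),("Then",t)])
    = PySem.Dict.mk [("Given", g + (steps.countP (fun s => PySem.Str.startswith s "Given") : Int)),
                     ("When",  w + (steps.countP (fun s => PySem.Str.startswith s "When") : Int)),
                     ("Then",  t + (steps.countP (fun s => PySem.Str.startswith s "Then") : Int))] := by
  induction steps generalizing g w t with
  | nil => simp
  | cons x xs ih =>
    simp only [List.foldl_cons]
    by_cases hG : PySem.Str.startswith x "Given" = true
    · rw [if_pos hG, modG, ih]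
      simp only [List.countP_cons, hG, sw_G_not_W x hG, sw_G_not_T x hG, if_true,
        Bool.false_eq_true, if_false, PySem.Dict.mk.injEq, List.cons.injEq, Prod.mk.injEq,
        true_and, and_true]
      omega
    · rw [if_neg hG]
      by_cases hW : PySem.Str.startswith x "When" = true
      · rw [if_pos hW, modW, ih]
        simp only [List.countP_cons, eq_false hG, hW, sw_W_not_T x hW, if_true,
          Bool.false_eq_true, if_false, PySem.Dict.mk.injEq, List.cons.injEq, Prod.mk.injEq,
          true_and, and_true]
        omega
      · rw [if_neg hW]
        by_cases hT : PySem.Str.startswith x "Then" = true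
        · rw [if_pos hT, modT, ih]
          simp only [List.countP_cons, eq_false hG, eq_false hW, hT, if_true,
            if_false, PySem.Dict.mk.injEq, List.cons.injEq, Prod.mk.injEq,
            true_and, and_true]
          omega
        · rw [if_neg hT, ih]
          simp only [List.countP_cons, eq_false hG, eq_false hW, eq_false hT,
            if_false, add_zero]

-- B's per-keyword sum of ones is the countP
lemma sum_ones_eq_countP (p : String → Bool) (steps : List String) :
    ((steps.filter p).map (fun _ => (1 : Int))).sum = (steps.countP p : Int) := by
  rw [List.countP_eq_length_filter]
  induction steps.filter p with
  | nil => simp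
  | cons x xs ih => simp only [List.map_cons, List.sum_cons, ih, List.length_cons]; push_cast; ring

-- ===== VERDICT (by name: the statement is the Claim_ definition above) =====
theorem duplicated_keywords_counter_spec : Claim_equal_duplicated_keywords_counter := by
  intro steps _
  show duplicated_keywords_counter steps = duplicated_keywords_counter_alt steps
  unfold duplicated_keywords_counter duplicated_keywords_counter_alt
  rw [show (((PySem.Dict.empty.insert "Given" (0 : Int)).insert "When" 0).insert "Then" 0)
        = PySem.Dict.mk [("Given",0),("When",0),("Then",0)] from rfl, loopA]
  simp only [List.map_cons, List.map_nil, sum_ones_eq_countP, zero_add]
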